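-- pv_equiv track=rewrite | github.com/thumbe12856/competitive-programming | cf/1700 Floor and Mod/solve.py | solve
-- ===== SOURCE A (Python) =====
-- def solve(x, y):
--     ans = 0
--     for i in range(2, y + 1, 1):
--         j = i + 1
--         k = 1
--         while j <= min(i * i, x):
--             k += 1
--             j = (i + 1) * k
--             ans += 1
--     return ans
-- ===== SOURCE B (Python) =====
-- def solve(x, y):
--     # One pass: the inner while-loop of A counts multiples of (i+1) up to
--     # min(i*i, x), which is just a clamped floor division.
--     total = 0
--     for i in range(2, y + 1):
--         total += max(0, min(i * i, x) // (i + 1))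
--     return total
-- ===== Notes on version B (the rewrite author's own statement) =====
-- stated objective: faster
-- what changed: B replaces A's inner while-loop (which enumerates every multiple of i+1 up to min(i*i,x) one by one) with the closed-form clamped floor division max(0, min(i*i,x)//(i+1)), turning the algorithm into a single O(y) pass.
import Mathlib
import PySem

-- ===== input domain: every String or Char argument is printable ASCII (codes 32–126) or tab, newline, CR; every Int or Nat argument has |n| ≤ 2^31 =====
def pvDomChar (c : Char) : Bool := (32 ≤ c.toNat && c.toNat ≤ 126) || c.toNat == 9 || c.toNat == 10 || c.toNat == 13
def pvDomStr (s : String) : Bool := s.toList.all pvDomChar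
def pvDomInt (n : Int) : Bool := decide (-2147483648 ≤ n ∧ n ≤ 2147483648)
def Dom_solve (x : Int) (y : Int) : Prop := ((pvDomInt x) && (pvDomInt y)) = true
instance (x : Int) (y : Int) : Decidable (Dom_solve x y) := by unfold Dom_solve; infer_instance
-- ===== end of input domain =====

-- B replaces A's inner while-loop (counting multiples of i+1 one by one) with the
-- closed-form clamped floor division, making it a single pass; faster.

-- ===== PORT A =====
-- inner while loop of A, state (j = c*k implicit, k, ans); the '0 < c' conjunct
-- is a totality guard only (at every call site c = i+1 ≥ 3).
def solveInner (c L k ans : Int) : Int :=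
  if h : 0 < c ∧ c * k ≤ L then solveInner c L (k + 1) (ans + 1) else ans
termination_by (L + c - c * k).toNat
decreasing_by
  obtain ⟨hc, hle⟩ := h
  have hck : c * (k + 1) = c * k + c := by ring
  omega

def solve (x : Int) (y : Int) : Int :=
  (PySem.List.pyRange 2 (y + 1) 1).foldl
    (fun ans i => solveInner (i + 1) (min (i * i) x) 1 ans) 0

-- ===== PORT B =====
def solve_alt (x : Int) (y : Int) : Int :=
  (PySem.List.pyRange 2 (y + 1) 1).foldl
    (fun total i => total + max 0 (PySem.Int.floordiv (min (i * i) x) (i + 1))) 0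

-- ===== PRECONDITION & SPEC =====
def Spec_solve (x : Int) (y : Int) (out : Int) : Prop := out = solve_alt x y
instance (x : Int) (y : Int) (out : Int) : Decidable (Spec_solve x y out) := by unfold Spec_solve; infer_instance

-- ===== CLAIM (what is proved, stated in full; the proofs are below) =====
def Claim_equal_solve : Prop := ∀ (x : Int) (y : Int), Dom_solve x y → Spec_solve x y (solve x y)

-- ===== LEMMAS AND PROOFS =====

-- A's inner loop counts the multiples c*k, c*(k+1), … that are ≤ L.
theorem solveInner_eq_aux (c L : Int) (hc : 0 < c) :
    ∀ (n : Nat) (k ans : Int), (L + c - c * k).toNat ≤ n →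
      solveInner c L k ans = ans + max 0 (PySem.Int.floordiv L c - k + 1) := by
  intro n
  induction n with
  | zero =>
    intro k ans hn
    have hgt : L < c * k := by omega
    rw [solveInner, dif_neg (by rintro ⟨-, hle⟩; omega)]
    have hlt : PySem.Int.floordiv L c < k :=
      (PySem.Int.floordiv_lt_iff_lt_mul hc).mpr (by linarith [mul_comm k c])
    omega
  | succ n ih =>
    intro k ans hn
    by_cases hle : c * k ≤ L
    · rw [solveInner, dif_pos ⟨hc, hle⟩]
      have hck : c * (k + 1) = c * k + c := by ring
      rw [ih (k + 1) (ans + 1) (by omega)]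
      have hk : k ≤ PySem.Int.floordiv L c :=
        (PySem.Int.le_floordiv_iff_mul_le hc).mpr (by linarith [mul_comm c k])
      omega
    · rw [solveInner, dif_neg (by rintro ⟨-, h⟩; omega)]
      have hlt : PySem.Int.floordiv L c < k :=
        (PySem.Int.floordiv_lt_iff_lt_mul hc).mpr (by push_neg at hle; linarith [mul_comm k c])
      omega

theorem solveInner_eq (c L : Int) (hc : 0 < c) (k ans : Int) :
    solveInner c L k ans = ans + max 0 (PySem.Int.floordiv L c - k + 1) :=
  solveInner_eq_aux c L hc (L + c - c * k).toNat k ans le_rfl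

theorem solve_eq_alt (x y : Int) : solve x y = solve_alt x y := by
  unfold solve solve_alt
  apply PySem.List.foldl_congr_mem
  intro ans i hi
  have h2 : 2 ≤ i := ((PySem.List.mem_pyRange_one).mp hi).1
  rw [solveInner_eq (i + 1) (min (i * i) x) (by omega) 1 ans]
  omega

-- ===== VERDICT (by name: the statement is the Claim_ definition above) =====
theorem solve_spec : Claim_equal_solve := by
  intro x y _
  unfold Spec_solve
  exact solve_eq_alt x y
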